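-- pv_equiv track=rewrite | github.com/liaosong0187765-maker/hermes-skill-packager | scripts/packager.py | extract_skill_step_mapping
-- ===== SOURCE A (Python) =====
-- def extract_skill_step_mapping(skills: list, workflow_name: str) -> dict:
--     """根据工作流名称，推断 skills 对应步骤"""
--     # 简单的关键词映射
--     step_keywords = {
--         "intake": ["blogwatcher", "github-finder", "x-tweet-fetcher", "arxiv", "url-ingest", "newsletter", "follow-builders", "web-to-FIM"],
--         "research": ["content-research", "article-translator", "research"],
--         "writing": ["wechat-article-writer", "write-xiaohongshu", "copywriting", "article-writer"],
--         "title": ["wechat-title-generator", "title-generator"],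
--         "visual": ["cover", "illustrator", "image", "designer", "slide", "comic"],
--         "publish": ["feishu-doc-to-wechat", "publisher", "post-to", "formatter", "converter"],
--         "review": ["diagnose", "analyzer", "llm-wiki", "dashboard"],
--     }
--
--     steps = {}
--     assigned = set()
--
--     for step_name, keywords in step_keywords.items():
--         for skill_name in skills:
--             if skill_name in assigned:
--                 continue
--             skill_lower = skill_name.lower()
--             for kw in keywords:
--                 if kw.lower() in skill_lower:
--                     steps[step_name] = skill_name
--                     assigned.add(skill_name)
--                     break
--
--     # 剩余的放其他
--     for skill_name in skills:
--         if skill_name not in assigned: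
--             steps[f"tool_{skill_name}"] = skill_name
--
--     return steps
-- ===== SOURCE B (Python) =====
-- def extract_skill_step_mapping(skills: list, workflow_name: str) -> dict:
--     """根据工作流名称，推断 skills 对应步骤"""
--     step_keywords = {
--         "intake": ["blogwatcher", "github-finder", "x-tweet-fetcher", "arxiv", "url-ingest", "newsletter", "follow-builders", "web-to-FIM"],
--         "research": ["content-research", "article-translator", "research"],
--         "writing": ["wechat-article-writer", "write-xiaohongshu", "copywriting", "article-writer"],
--         "title": ["wechat-title-generator", "title-generator"],
--         "visual": ["cover", "illustrator", "image", "designer", "slide", "comic"],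
--         "publish": ["feishu-doc-to-wechat", "publisher", "post-to", "formatter", "converter"],
--         "review": ["diagnose", "analyzer", "llm-wiki", "dashboard"],
--     }
--
--     def classify(skill_name):
--         # first step (in table order) one of whose keywords occurs in the skill name
--         low = skill_name.lower()
--         for step_name, keywords in step_keywords.items():
--             if any(kw.lower() in low for kw in keywords):
--                 return step_name
--         return None
--
--     # only a skill's first occurrence can claim a slot; classify each distinct skill once
--     uniq = list(dict.fromkeys(skills))
--     cls = {s: classify(s) for s in uniq}
--
--     steps = {}
--     for step_name in step_keywords:
--         for s in uniq:
--             if cls[s] == step_name: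
--                 steps[step_name] = s
--     for s in skills:
--         if cls[s] is None:
--             steps["tool_" + s] = s
--     return steps
-- ===== Notes on version B (the rewrite author's own statement) =====
-- stated objective: alternative
-- what changed: B replaces A's nested steps-over-skills loop with a mutable 'assigned' set by a pure per-skill classify function (first step whose keyword occurs in the skill name) applied to the deduplicated skill list, then one selection pass per step and one pass for unmatched tools.
import Mathlib
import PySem

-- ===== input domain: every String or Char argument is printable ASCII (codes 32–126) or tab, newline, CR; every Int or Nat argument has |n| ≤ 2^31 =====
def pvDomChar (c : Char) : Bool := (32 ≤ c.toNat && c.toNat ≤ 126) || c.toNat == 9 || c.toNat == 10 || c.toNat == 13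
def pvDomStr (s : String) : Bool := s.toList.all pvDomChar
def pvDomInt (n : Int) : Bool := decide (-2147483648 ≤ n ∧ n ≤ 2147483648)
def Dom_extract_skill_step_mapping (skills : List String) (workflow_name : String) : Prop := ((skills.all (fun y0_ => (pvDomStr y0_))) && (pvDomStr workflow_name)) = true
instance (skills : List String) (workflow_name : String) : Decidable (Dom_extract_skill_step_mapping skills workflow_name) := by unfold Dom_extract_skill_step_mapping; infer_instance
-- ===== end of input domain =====

-- B replaces A's nested steps×skills loop with a mutable assigned-set by a pure per-skill
-- classify function over the deduplicated skill list (alternative decomposition, same cost).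

-- shared constant table (the step_keywords literal of both programs)
def pvStepKeywords : List (String × List String) :=
  [("intake", ["blogwatcher", "github-finder", "x-tweet-fetcher", "arxiv", "url-ingest", "newsletter", "follow-builders", "web-to-FIM"]),
   ("research", ["content-research", "article-translator", "research"]),
   ("writing", ["wechat-article-writer", "write-xiaohongshu", "copywriting", "article-writer"]),
   ("title", ["wechat-title-generator", "title-generator"]),
   ("visual", ["cover", "illustrator", "image", "designer", "slide", "comic"]),
   ("publish", ["feishu-doc-to-wechat", "publisher", "post-to", "formatter", "converter"]),
   ("review", ["diagnose", "analyzer", "llm-wiki", "dashboard"])]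

-- `skill_lower = skill_name.lower()` then `for kw in keywords: if kw.lower() in skill_lower: …; break`
-- (the loop's only effect fires on the first hit, so it is the any-of-keywords test)
def pvKwMatch (keywords : List String) (skill_name : String) : Bool :=
  let skill_lower := PySem.Str.lower skill_name
  keywords.any (fun kw => PySem.Str.isIn (PySem.Str.lower kw) skill_lower)

-- ===== PORT A =====
def extract_skill_step_mapping (skills : List String) (workflow_name : String) : List (String × String) :=
  let st := pvStepKeywords.foldl
    (fun (st : PySem.Dict String String × PySem.Set String) p =>
      skills.foldl
        (fun (st : PySem.Dict String String × PySem.Set String) skill_name =>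
          if st.2.contains skill_name then st
          else if pvKwMatch p.2 skill_name then
            (st.1.insert p.1 skill_name, st.2.add skill_name)
          else st)
        st)
    (PySem.Dict.empty, PySem.Set.empty)
  (skills.foldl
    (fun (d : PySem.Dict String String) skill_name =>
      if st.2.contains skill_name then d
      else d.insert ("tool_" ++ skill_name) skill_name)
    st.1).items

-- ===== PORT B =====
-- first step (in table order) one of whose keywords occurs in the skill name, else none
def pvClassify (skill_name : String) : Option String :=
  (pvStepKeywords.find? (fun p => pvKwMatch p.2 skill_name)).map Prod.fst

def extract_skill_step_mapping_alt (skills : List String) (workflow_name : String) : List (String × String) :=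
  let uniq := PySem.List.dedup skills            -- list(dict.fromkeys(skills))
  -- cls = {s: classify(s) for s in uniq}; the later cls[s] lookups always hit (every skill is in
  -- uniq), so Python's KeyError path is unreachable and getD is exact
  let cls : PySem.Dict String (Option String) :=
    uniq.foldl (fun d s => d.insert s (pvClassify s)) PySem.Dict.empty
  let steps := pvStepKeywords.foldl
    (fun (d : PySem.Dict String String) p =>
      uniq.foldl (fun (d : PySem.Dict String String) s =>
        if cls.getD s none == some p.1 then d.insert p.1 s else d) d)
    PySem.Dict.empty
  (skills.foldl
    (fun (d : PySem.Dict String String) s =>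
      if (cls.getD s none).isNone then d.insert ("tool_" ++ s) s else d)
    steps).items

-- ===== PRECONDITION & SPEC =====
def Spec_extract_skill_step_mapping (skills : List String) (workflow_name : String) (out : List (String × String)) : Prop := out = extract_skill_step_mapping_alt skills workflow_name
instance (skills : List String) (workflow_name : String) (out : List (String × String)) : Decidable (Spec_extract_skill_step_mapping skills workflow_name out) := by unfold Spec_extract_skill_step_mapping; infer_instance

-- ===== CLAIM (what is proved, stated in full; the proofs are below) =====
def Claim_equal_extract_skill_step_mapping : Prop := ∀ (skills : List String) (workflow_name : String), Dom_extract_skill_step_mapping skills workflow_name → Spec_extract_skill_step_mapping skills workflow_name (extract_skill_step_mapping skills workflow_name)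

-- ===== LEMMAS AND PROOFS =====

-- A's per-step pass and B's per-step pass, named for the proofs
def pvAstep (skills : List String) (st : PySem.Dict String String × PySem.Set String)
    (p : String × List String) : PySem.Dict String String × PySem.Set String :=
  skills.foldl
    (fun (st : PySem.Dict String String × PySem.Set String) skill_name =>
      if st.2.contains skill_name then st
      else if pvKwMatch p.2 skill_name then
        (st.1.insert p.1 skill_name, st.2.add skill_name)
      else st)
    st

def pvBstep (uniq : List String) (cls : PySem.Dict String (Option String))
    (d : PySem.Dict String String) (p : String × List String) : PySem.Dict String String :=
  uniq.foldl (fun (d : PySem.Dict String String) s =>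
    if cls.getD s none == some p.1 then d.insert p.1 s else d) d

-- the memo dict built over a list of distinct-or-not keys answers f on every member
lemma pv_memo_get (f : String → Option String) :
    ∀ (l : List String) (d : PySem.Dict String (Option String)) (t : String),
      t ∈ l ∨ d.get? t = some (f t) →
      (l.foldl (fun d s => d.insert s (f s)) d).get? t = some (f t) := by
  intro l
  induction l with
  | nil =>
      intro d t h
      rcases h with h | h
      · exact absurd h (List.not_mem_nil)
      · exact h
  | cons s r ih =>
      intro d t h
      simp only [List.foldl_cons]
      by_cases hts : t = s
      · subst hts
        exact ih _ _ (Or.inr (PySem.Dict.get?_insert_self ..))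
      · rcases h with h | h
        · rcases List.mem_cons.mp h with h | h
          · exact absurd h hts
          · exact ih _ _ (Or.inl h)
        · refine ih _ _ (Or.inr ?_)
          rw [PySem.Dict.get?_insert_of_ne]
          · exact h
          · exact fun he => hts he

lemma pv_cls_getD (skills : List String) (t : String) (ht : t ∈ PySem.List.dedup skills) :
    ((PySem.List.dedup skills).foldl
        (fun d s => d.insert s (pvClassify s)) PySem.Dict.empty).getD t none = pvClassify t := by
  have h := pv_memo_get pvClassify (PySem.List.dedup skills) PySem.Dict.empty t (Or.inl ht)
  rw [PySem.Dict.getD_eq_get?_getD, h]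
  rfl

-- the sequence of skills newly claimed by step p (first unassigned occurrences that match)
def pvNewM (p : String × List String) : List String → PySem.Set String → List String
  | [], _ => []
  | s :: r, a =>
      if a.contains s then pvNewM p r a
      else if pvKwMatch p.2 s then s :: pvNewM p r (PySem.Set.add a s)
      else pvNewM p r a

lemma pv_inner_eq (p : String × List String) (sl : List String)
    (d : PySem.Dict String String) (a : PySem.Set String) :
    pvAstep sl (d, a) p =
      ((pvNewM p sl a).foldl (fun d s => d.insert p.1 s) d,
       (pvNewM p sl a).foldl PySem.Set.add a) := by
  induction sl generalizing d a with
  | nil => rfl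
  | cons s r ih =>
      simp only [pvAstep, List.foldl_cons, pvNewM] at *
      by_cases hc : s ∈ a
      · simp [hc]
        simpa using ih d a
      · by_cases hm : pvKwMatch p.2 s
        · simp [hc, hm]
          simpa [PySem.Set.add_of_not_mem hc] using ih (d.insert p.1 s) (PySem.Set.add a s)
        · simp [hc, hm]
          simpa using ih d a

lemma pv_mem_newM_fold (p : String × List String) (sl : List String) (a : PySem.Set String)
    (t : String) :
    t ∈ (pvNewM p sl a).foldl PySem.Set.add a ↔
      t ∈ a ∨ (t ∈ sl ∧ pvKwMatch p.2 t = true) := by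
  induction sl generalizing a with
  | nil => simp [pvNewM]
  | cons s r ih =>
      simp only [pvNewM]
      by_cases hc : s ∈ a
      · rw [if_pos (by simpa using hc)]
        rw [ih]
        constructor
        · rintro (h | ⟨h1, h2⟩)
          · exact Or.inl h
          · exact Or.inr ⟨List.mem_cons_of_mem _ h1, h2⟩
        · rintro (h | ⟨h1, h2⟩)
          · exact Or.inl h
          · rcases List.mem_cons.mp h1 with h1 | h1
            · subst h1; exact Or.inl hc
            · exact Or.inr ⟨h1, h2⟩
      · rw [if_neg (by simpa using hc)]
        by_cases hm : pvKwMatch p.2 s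
        · rw [if_pos hm]
          simp only [List.foldl_cons]
          rw [ih]
          simp only [PySem.Set.mem_add]
          constructor
          · rintro ((h | h) | ⟨h1, h2⟩)
            · exact Or.inl h
            · subst h; exact Or.inr ⟨List.mem_cons_self .., hm⟩
            · exact Or.inr ⟨List.mem_cons_of_mem _ h1, h2⟩
          · rintro (h | ⟨h1, h2⟩)
            · exact Or.inl (Or.inl h)
            · rcases List.mem_cons.mp h1 with h1 | h1
              · subst h1; exact Or.inl (Or.inr rfl)
              · exact Or.inr ⟨h1, h2⟩
        · rw [if_neg hm]
          rw [ih]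
          constructor
          · rintro (h | ⟨h1, h2⟩)
            · exact Or.inl h
            · exact Or.inr ⟨List.mem_cons_of_mem _ h1, h2⟩
          · rintro (h | ⟨h1, h2⟩)
            · exact Or.inl h
            · rcases List.mem_cons.mp h1 with h1 | h1
              · subst h1; exact absurd h2 hm
              · exact Or.inr ⟨h1, h2⟩

lemma pv_newM_filter (p : String × List String) (sl : List String) (a : PySem.Set String) :
    pvNewM p sl a =
      (PySem.List.dedup sl).filter (fun s => !a.contains s && pvKwMatch p.2 s) := by
  induction sl generalizing a with
  | nil => simp [pvNewM, PySem.List.dedup]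
  | cons s r ih =>
      have hded : PySem.List.dedup (s :: r) = s :: (PySem.List.dedup r).filter (fun y => !(y == s)) := by
        simp only [PySem.List.dedup_eq_ofList, PySem.Set.ofList_cons, PySem.Set.discard]
      rw [hded]
      simp only [pvNewM, List.filter_cons, List.filter_filter]
      by_cases hc : s ∈ a
      · rw [if_pos (by simpa using hc)]
        have hga : (!a.contains s && pvKwMatch p.2 s) = false := by simp [hc]
        rw [hga]
        simp only [Bool.false_eq_true, if_false]
        rw [ih]
        apply List.filter_congr
        intro t ht
        by_cases hts : t = s
        · subst hts; simp [hc]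
        · simp [hts]
      · rw [if_neg (by simpa using hc)]
        by_cases hm : pvKwMatch p.2 s
        · rw [if_pos hm]
          have hga : (!a.contains s && pvKwMatch p.2 s) = true := by simp [hc, hm]
          rw [hga]
          simp only [if_true]
          rw [ih]
          congr 1
          apply List.filter_congr
          intro t ht
          by_cases hts : t = s
          · subst hts; simp
          · simp [hts, hc]
        · rw [if_neg hm]
          have hga : (!a.contains s && pvKwMatch p.2 s) = false := by simp [hm]
          rw [hga]
          simp only [Bool.false_eq_true, if_false]
          rw [ih]
          apply List.filter_congr
          intro t ht
          by_cases hts : t = s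
          · subst hts; simp [hm]
          · simp [hts]

lemma pv_names_nodup : (pvStepKeywords.map Prod.fst).Nodup := by decide

lemma pv_name_split (P R : List (String × List String)) (p : String × List String)
    (h : pvStepKeywords = P ++ p :: R) :
    p.1 ∉ P.map Prod.fst ∧ p.1 ∉ R.map Prod.fst := by
  have hn := pv_names_nodup
  rw [h] at hn
  simp only [List.map_append, List.map_cons] at hn
  rw [List.nodup_append] at hn
  obtain ⟨h1, h2, h3⟩ := hn
  rw [List.nodup_cons] at h2
  refine ⟨fun hm => ?_, h2.1⟩
  exact h3 _ hm p.1 (List.mem_cons_self ..) rfl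

lemma pv_classify_eq (P R : List (String × List String)) (p : String × List String) (s : String)
    (h : pvStepKeywords = P ++ p :: R) :
    (pvClassify s == some p.1) =
      (!(P.any (fun q => pvKwMatch q.2 s)) && pvKwMatch p.2 s) := by
  obtain ⟨hP, hR⟩ := pv_name_split P R p h
  unfold pvClassify
  rw [h, List.find?_append]
  cases hfp : P.find? (fun q => pvKwMatch q.2 s) with
  | some q =>
      have hq : q ∈ P := List.mem_of_find?_eq_some hfp
      have hqt : pvKwMatch q.2 s = true := by
        simpa using List.find?_some (p := fun q : String × List String => pvKwMatch q.2 s) hfp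
      have hany : P.any (fun q => pvKwMatch q.2 s) = true := by
        rw [List.any_eq_true]; exact ⟨q, hq, hqt⟩
      have hne : q.1 ≠ p.1 := fun he => hP (he ▸ List.mem_map_of_mem hq)
      simp [hany, hne]
  | none =>
      have hany : P.any (fun q => pvKwMatch q.2 s) = false := by
        rw [List.any_eq_false]
        intro q hq
        simpa using List.find?_eq_none.mp hfp q hq
      rw [hany]
      simp only [Option.none_or, Bool.not_false, Bool.true_and]
      cases hm : pvKwMatch p.2 s with
      | true => rw [List.find?_cons, hm]; simp
      | false =>
          rw [List.find?_cons, hm]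
          cases hfr : R.find? (fun q => pvKwMatch q.2 s) with
          | some r =>
              have hr : r ∈ R := List.mem_of_find?_eq_some hfr
              have hne : r.1 ≠ p.1 := fun he => hR (he ▸ List.mem_map_of_mem hr)
              simp [hne]
          | none => simp

lemma pv_classify_isNone (s : String) :
    (pvClassify s).isNone = !(pvStepKeywords.any (fun q => pvKwMatch q.2 s)) := by
  unfold pvClassify
  cases hf : pvStepKeywords.find? (fun q => pvKwMatch q.2 s) with
  | some q =>
      have hq : q ∈ pvStepKeywords := List.mem_of_find?_eq_some hf
      have hqt : pvKwMatch q.2 s = true := by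
        simpa using List.find?_some (p := fun q : String × List String => pvKwMatch q.2 s) hf
      have hany : pvStepKeywords.any (fun q => pvKwMatch q.2 s) = true := by
        rw [List.any_eq_true]; exact ⟨q, hq, hqt⟩
      simp [hany]
  | none =>
      have hfalse : pvStepKeywords.any (fun q => pvKwMatch q.2 s) = false := by
        rw [List.any_eq_false]
        intro q hq
        simpa using List.find?_eq_none.mp hf q hq
      simp [hfalse]

lemma pv_dstep_eq (skills : List String) (P L' : List (String × List String))
    (p : String × List String) (d : PySem.Dict String String) (a : PySem.Set String)
    (cls : PySem.Dict String (Option String))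
    (hcls : ∀ t ∈ PySem.List.dedup skills, cls.getD t none = pvClassify t)
    (h : pvStepKeywords = P ++ p :: L')
    (hInv : ∀ t, a.contains t = (skills.contains t && P.any (fun q => pvKwMatch q.2 t))) :
    (pvNewM p skills a).foldl (fun d s => d.insert p.1 s) d =
      pvBstep (PySem.List.dedup skills) cls d p := by
  unfold pvBstep
  rw [← List.foldl_filter]
  rw [pv_newM_filter]
  congr 1
  apply List.filter_congr
  intro t ht
  have hts : t ∈ skills := (PySem.List.mem_dedup _ _).mp ht
  rw [hcls t ht, pv_classify_eq P L' p t h, hInv t]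
  have : skills.contains t = true := by simpa using hts
  rw [this]
  simp

lemma pv_ainv_step (skills : List String) (P : List (String × List String))
    (p : String × List String) (a : PySem.Set String)
    (hInv : ∀ t, a.contains t = (skills.contains t && P.any (fun q => pvKwMatch q.2 t))) :
    ∀ t, ((pvNewM p skills a).foldl PySem.Set.add a).contains t =
      (skills.contains t && (P ++ [p]).any (fun q => pvKwMatch q.2 t)) := by
  intro t
  rw [Bool.eq_iff_iff]
  rw [PySem.Set.contains_iff]
  rw [pv_mem_newM_fold]
  have h1 : t ∈ a ↔ (t ∈ skills ∧ P.any (fun q => pvKwMatch q.2 t) = true) := by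
    rw [← PySem.Set.contains_iff, hInv t]
    simp
  rw [h1]
  simp only [Bool.and_eq_true, List.any_append, List.any_cons, List.any_nil, Bool.or_eq_true,
    List.contains_iff_mem]
  constructor
  · rintro (⟨h2, h3⟩ | ⟨h2, h3⟩)
    · exact ⟨h2, Or.inl h3⟩
    · exact ⟨h2, Or.inr (by simpa using h3)⟩
  · rintro ⟨h2, h3 | h3⟩
    · exact Or.inl ⟨h2, h3⟩
    · exact Or.inr ⟨h2, by simpa using h3⟩

lemma pv_outer (skills : List String) (cls : PySem.Dict String (Option String))
    (hcls : ∀ t ∈ PySem.List.dedup skills, cls.getD t none = pvClassify t) :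
    ∀ (L P : List (String × List String)) (d : PySem.Dict String String) (a : PySem.Set String),
      pvStepKeywords = P ++ L →
      (∀ t, a.contains t = (skills.contains t && P.any (fun q => pvKwMatch q.2 t))) →
      (L.foldl (pvAstep skills) (d, a)).1 = L.foldl (pvBstep (PySem.List.dedup skills) cls) d ∧
      (∀ t, (L.foldl (pvAstep skills) (d, a)).2.contains t =
        (skills.contains t && (P ++ L).any (fun q => pvKwMatch q.2 t))) := by
  intro L
  induction L with
  | nil =>
      intro P d a h hInv
      refine ⟨rfl, fun t => ?_⟩
      simpa using hInv t
  | cons p L' ih =>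
      intro P d a h hInv
      have h' : pvStepKeywords = (P ++ [p]) ++ L' := by rw [h, List.append_cons]
      simp only [List.foldl_cons]
      rw [pv_inner_eq]
      have hd := pv_dstep_eq skills P L' p d a cls hcls h hInv
      have ha := pv_ainv_step skills P p a hInv
      obtain ⟨ih1, ih2⟩ := ih (P ++ [p])
        ((pvNewM p skills a).foldl (fun d s => d.insert p.1 s) d)
        ((pvNewM p skills a).foldl PySem.Set.add a) h' ha
      refine ⟨?_, fun t => ?_⟩
      · rw [ih1, hd]
      · rw [ih2 t]
        simp [List.any_append]

-- ===== VERDICT (by name: the statement is the Claim_ definition above) =====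
theorem extract_skill_step_mapping_spec : Claim_equal_extract_skill_step_mapping := by
  intro skills workflow_name _
  unfold Spec_extract_skill_step_mapping
  have hinit : ∀ t : String, (PySem.Set.empty : PySem.Set String).contains t =
      (skills.contains t && (([] : List (String × List String)).any (fun q => pvKwMatch q.2 t))) := by
    intro t; simp [PySem.Set.empty]
  obtain ⟨h1, h2⟩ := pv_outer skills
    ((PySem.List.dedup skills).foldl (fun d s => d.insert s (pvClassify s)) PySem.Dict.empty)
    (fun t ht => pv_cls_getD skills t ht)
    pvStepKeywords [] PySem.Dict.empty PySem.Set.empty rfl hinit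
  simp only [List.nil_append] at h2
  have hA : extract_skill_step_mapping skills workflow_name =
      (skills.foldl
        (fun (d : PySem.Dict String String) skill_name =>
          if (pvStepKeywords.foldl (pvAstep skills) (PySem.Dict.empty, PySem.Set.empty)).2.contains skill_name then d
          else d.insert ("tool_" ++ skill_name) skill_name)
        (pvStepKeywords.foldl (pvAstep skills) (PySem.Dict.empty, PySem.Set.empty)).1).items := rfl
  have hB : extract_skill_step_mapping_alt skills workflow_name =
      (skills.foldl
        (fun (d : PySem.Dict String String) s =>
          if (((PySem.List.dedup skills).foldl (fun d s => d.insert s (pvClassify s))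
                PySem.Dict.empty).getD s none).isNone then d.insert ("tool_" ++ s) s else d)
        (pvStepKeywords.foldl
          (pvBstep (PySem.List.dedup skills)
            ((PySem.List.dedup skills).foldl (fun d s => d.insert s (pvClassify s)) PySem.Dict.empty))
          PySem.Dict.empty)).items := rfl
  rw [hA, hB, h1]
  congr 1
  apply PySem.List.foldl_congr_mem
  intro acc x hx
  have hx' : skills.contains x = true := by simpa using hx
  rw [h2 x, hx', pv_cls_getD skills x ((PySem.List.mem_dedup _ _).mpr hx), pv_classify_isNone x]
  cases hany : pvStepKeywords.any (fun q => pvKwMatch q.2 x) <;> simp
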